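-- pv_equiv track=rewrite | github.com/risavjhagithubrit/Bajaj_Backend | app.py | process_data
-- ===== SOURCE A (Python) =====
-- def process_data(data):
--     numbers = []
--     alphabets = []
--     highest_lowercase_alphabet = []
--
--     for item in data:
--         if item.isdigit():
--             numbers.append(item)
--         elif item.isalpha():
--             alphabets.append(item)
--             if item.islower():
--                 if not highest_lowercase_alphabet or item > highest_lowercase_alphabet[0]:
--                     highest_lowercase_alphabet = [item]
--
--     return numbers, alphabets, highest_lowercase_alphabet
-- ===== SOURCE B (Python) =====
-- def process_data(data):
--     numbers = [x for x in data if x.isdigit()]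
--     alphabets = [x for x in data if x.isalpha()]
--     lowers = [x for x in alphabets if x.islower()]
--     highest_lowercase_alphabet = [max(lowers)] if lowers else []
--     return numbers, alphabets, highest_lowercase_alphabet
-- ===== Notes on version B (the rewrite author's own statement) =====
-- stated objective: simpler
-- what changed: Replaces the single loop with an inline running-max accumulator by three filter comprehensions plus one max() reduction over the lowercase letters.
import Mathlib
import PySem

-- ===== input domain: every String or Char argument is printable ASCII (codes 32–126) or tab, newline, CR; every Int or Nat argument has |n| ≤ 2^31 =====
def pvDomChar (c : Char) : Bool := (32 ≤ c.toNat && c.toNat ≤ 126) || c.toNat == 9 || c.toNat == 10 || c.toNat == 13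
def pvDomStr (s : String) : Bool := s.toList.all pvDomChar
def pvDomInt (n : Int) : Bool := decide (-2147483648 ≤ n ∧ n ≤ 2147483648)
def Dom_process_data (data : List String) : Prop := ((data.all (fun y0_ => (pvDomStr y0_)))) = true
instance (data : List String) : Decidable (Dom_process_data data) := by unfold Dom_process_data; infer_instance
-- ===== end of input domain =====

-- B replaces A's single loop with a running-max accumulator by three filters plus one max() reduction (objective: simpler).

-- str.islower(): at least one cased character and no uppercase one — exact on the ASCII domain,
-- where the cased characters are exactly the letters (shared primitive helper for both ports).
def pyStrIslower (s : String) : Bool :=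
  s.toList.any PySem.Chars.islower && s.toList.all (fun c => !(PySem.Chars.isupper c))

-- ===== PORT A =====
def processStepA (st : List String × List String × List String) (item : String) :
    List String × List String × List String :=
  let (numbers, alphabets, high) := st
  if PySem.Str.strIsdigit item then (numbers ++ [item], alphabets, high)
  else if PySem.Str.strIsalpha item then
    let alphabets := alphabets ++ [item]
    if pyStrIslower item then
      if high.isEmpty || decide (high.headI < item) then (numbers, alphabets, [item])
      else (numbers, alphabets, high)
    else (numbers, alphabets, high)
  else st

def process_data (data : List String) : List String × List String × List String :=
  data.foldl processStepA ([], [], [])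

-- ===== PORT B =====
def process_data_alt (data : List String) : List String × List String × List String :=
  let numbers := data.filter PySem.Str.strIsdigit
  let alphabets := data.filter PySem.Str.strIsalpha
  let lowers := alphabets.filter pyStrIslower
  let highest :=
    match PySem.List.max? lowers (fun x => x) with
    | some m => [m]
    | none => []
  (numbers, alphabets, highest)

-- ===== PRECONDITION & SPEC =====
def Spec_process_data (data : List String) (out : List String × List String × List String) : Prop := out = process_data_alt data
instance (data : List String) (out : List String × List String × List String) : Decidable (Spec_process_data data out) := by unfold Spec_process_data; infer_instance

-- ===== CLAIM (what is proved, stated in full; the proofs are below) =====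
def Claim_equal_process_data : Prop := ∀ (data : List String), Dom_process_data data → Spec_process_data data (process_data data)

-- ===== LEMMAS AND PROOFS =====

-- the evolution of the highest-lowercase accumulator, restricted to the lowercase-alphabetic items
def hStep (h : List String) (item : String) : List String :=
  if h.isEmpty || decide (h.headI < item) then [item] else h

lemma hStep_singleton (m x : String) : hStep [m] x = [max m x] := by
  rcases lt_trichotomy m x with hlt | heq | hgt
  · simp [hStep, hlt, max_eq_right hlt.le]
  · subst heq; simp [hStep, max_self]
  · simp [hStep, not_lt_of_gt hgt, max_eq_left hgt.le]

lemma hFold_singleton (t : List String) (m : String) :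
    t.foldl hStep [m] = [t.foldl max m] := by
  induction t generalizing m with
  | nil => rfl
  | cons x t ih => simp [List.foldl_cons, hStep_singleton, ih]

lemma hFold_eq_max? (ls : List String) :
    ls.foldl hStep [] =
      (match PySem.List.max? ls (fun x => x) with
       | some m => [m]
       | none => []) := by
  cases ls with
  | nil => rfl
  | cons x t =>
      rw [PySem.List.max?_id_cons]
      show (x :: t).foldl hStep [] = [t.foldl max x]
      have : (x :: t).foldl hStep [] = t.foldl hStep [x] := by
        simp [List.foldl_cons, hStep]
      rw [this, hFold_singleton]

lemma not_alpha_of_digit (x : String) (hd : PySem.Chars.strIsdigit x.toList = true) :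
    PySem.Chars.strIsalpha x.toList = false := by
  simp only [PySem.Chars.strIsdigit, Bool.and_eq_true, List.all_eq_true] at hd
  obtain ⟨hne, hall⟩ := hd
  rcases hx : x.toList with _ | ⟨c, cs⟩
  · rw [hx] at hne; simp at hne
  · have hc := hall c (by rw [hx]; simp)
    simp only [PySem.Chars.isdigit, Bool.and_eq_true, decide_eq_true_eq] at hc
    have hA : PySem.Chars.isalpha c = false := by
      simp only [PySem.Chars.isalpha, PySem.Chars.isupper, PySem.Chars.islower]
      have h1 : ¬ ('A' ≤ c) := fun hh => absurd (le_trans hh hc.2) (by decide)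
      have h2 : ¬ ('a' ≤ c) := fun hh => absurd (le_trans hh hc.2) (by decide)
      simp [h1, h2]
    simp [PySem.Chars.strIsalpha, hA]

lemma loopA (data : List String) (n a h : List String) :
    data.foldl processStepA (n, a, h) =
      (n ++ data.filter PySem.Str.strIsdigit,
       a ++ data.filter PySem.Str.strIsalpha,
       (data.filter (fun x => pyStrIslower x && PySem.Str.strIsalpha x)).foldl hStep h) := by
  induction data generalizing n a h with
  | nil => simp
  | cons x t ih =>
      by_cases hd : PySem.Chars.strIsdigit x.toList
      · have ha := not_alpha_of_digit x hd
        have hstep : processStepA (n, a, h) x = (n ++ [x], a, h) := by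
          simp only [processStepA]
          rw [if_pos (show PySem.Str.strIsdigit x = true from hd)]
        rw [List.foldl_cons, hstep, ih]
        simp [hd, ha]
      · by_cases ha : PySem.Chars.strIsalpha x.toList
        · by_cases hl : pyStrIslower x
          · have hstep : processStepA (n, a, h) x = (n, a ++ [x], hStep h x) := by
              simp only [processStepA]
              rw [if_neg (show ¬ (PySem.Str.strIsdigit x = true) from hd),
                if_pos (show PySem.Str.strIsalpha x = true from ha), if_pos hl]
              unfold hStep
              split <;> rfl
            rw [List.foldl_cons, hstep, ih]
            simp [hd, ha, hl]
          · have hstep : processStepA (n, a, h) x = (n, a ++ [x], h) := by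
              simp only [processStepA]
              rw [if_neg (show ¬ (PySem.Str.strIsdigit x = true) from hd),
                if_pos (show PySem.Str.strIsalpha x = true from ha), if_neg hl]
            rw [List.foldl_cons, hstep, ih]
            simp [hd, ha, hl]
        · have hstep : processStepA (n, a, h) x = (n, a, h) := by
            simp only [processStepA]
            rw [if_neg (show ¬ (PySem.Str.strIsdigit x = true) from hd),
              if_neg (show ¬ (PySem.Str.strIsalpha x = true) from ha)]
          rw [List.foldl_cons, hstep, ih]
          simp [hd, ha]

-- ===== VERDICT (by name: the statement is the Claim_ definition above) =====
theorem process_data_spec : Claim_equal_process_data := by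
  intro data _
  show process_data data = process_data_alt data
  unfold process_data process_data_alt
  rw [loopA, hFold_eq_max?]
  simp [List.filter_filter]
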